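-- pv_equiv track=rewrite | github.com/noobosaurus-r3x/cshake | cshake.py | parse_curl_handshake
-- ===== SOURCE A (Python) =====
-- from collections import OrderedDict
--
-- def parse_curl_handshake(output: str) -> OrderedDict:
--     initial_stages = OrderedDict({
--         "Client Hello": {"direction": "OUT", "status": "pending"},
--         "Server Hello": {"direction": "IN", "status": "pending"},
--         "Encrypted Extensions": {"direction": "IN", "status": "pending"},
--         "Certificate": {"direction": "IN", "status": "pending"},
--         "CERT Verify": {"direction": "IN", "status": "pending"},
--         "Change Cipher Spec": {"direction": "OUT", "status": "pending"},
--         "Finished": {"direction": "OUT", "status": "pending"},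
--         "New Session Ticket": {"direction": "IN", "status": "skipped"},
--     })
--
--     mapping = {
--         "client hello": "Client Hello",
--         "server hello": "Server Hello",
--         "encrypted extensions": "Encrypted Extensions",
--         "certificate": "Certificate",
--         "cert verify": "CERT Verify",
--         "change cipher spec": "Change Cipher Spec",
--         "finished": "Finished",
--         "new session ticket": "New Session Ticket"
--     }
--     lines = output.split("\n")
--     found_new_session_ticket = False
--     for line in lines:
--         lower_line = line.lower()
--         for key, stage_label in mapping.items():
--             if key in lower_line:
--                 initial_stages[stage_label]["status"] = "success"
--                 if key == "new session ticket":
--                     found_new_session_ticket = True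
--
--     if not found_new_session_ticket:
--         initial_stages["New Session Ticket"]["status"] = "skipped"
--     return initial_stages
-- ===== SOURCE B (Python) =====
-- from collections import OrderedDict
--
-- def parse_curl_handshake(output: str) -> OrderedDict:
--     stages = OrderedDict([
--         ("Client Hello", {"direction": "OUT", "status": "pending"}),
--         ("Server Hello", {"direction": "IN", "status": "pending"}),
--         ("Encrypted Extensions", {"direction": "IN", "status": "pending"}),
--         ("Certificate", {"direction": "IN", "status": "pending"}),
--         ("CERT Verify", {"direction": "IN", "status": "pending"}),
--         ("Change Cipher Spec", {"direction": "OUT", "status": "pending"}),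
--         ("Finished", {"direction": "OUT", "status": "pending"}),
--         ("New Session Ticket", {"direction": "IN", "status": "skipped"}),
--     ])
--     text = output.lower()
--     for key, label in [
--         ("client hello", "Client Hello"),
--         ("server hello", "Server Hello"),
--         ("encrypted extensions", "Encrypted Extensions"),
--         ("certificate", "Certificate"),
--         ("cert verify", "CERT Verify"),
--         ("change cipher spec", "Change Cipher Spec"),
--         ("finished", "Finished"),
--         ("new session ticket", "New Session Ticket"),
--     ]:
--         if key in text:
--             stages[label]["status"] = "success"
--     return stages
-- ===== Notes on version B (the rewrite author's own statement) =====
-- stated objective: simpler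
-- what changed: B lowercases the whole output once and does a single pass over the 8 (substring, stage) pairs testing each against the full lowered text, replacing A's per-line x per-key nested loops and dropping the found_new_session_ticket flag (the stage already defaults to 'skipped').
import Mathlib
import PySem

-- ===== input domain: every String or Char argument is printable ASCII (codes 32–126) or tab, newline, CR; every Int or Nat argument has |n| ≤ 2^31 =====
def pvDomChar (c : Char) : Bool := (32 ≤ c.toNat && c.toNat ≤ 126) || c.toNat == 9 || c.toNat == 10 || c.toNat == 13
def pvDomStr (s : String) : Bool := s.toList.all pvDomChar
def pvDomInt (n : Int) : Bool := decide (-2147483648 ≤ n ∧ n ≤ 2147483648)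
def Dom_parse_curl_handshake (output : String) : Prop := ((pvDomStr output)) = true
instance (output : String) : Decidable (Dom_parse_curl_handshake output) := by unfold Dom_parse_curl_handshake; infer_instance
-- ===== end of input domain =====

-- B lowercases the whole output once and scans the 8 (substring, stage) pairs in a single flat
-- pass, instead of A's per-line × per-key nested loops with a found_new_session_ticket flag
-- (objective: simpler).

-- ===== PORT A =====
def pvMappingA : List (String × String) :=
  [("client hello", "Client Hello"),
   ("server hello", "Server Hello"),
   ("encrypted extensions", "Encrypted Extensions"),
   ("certificate", "Certificate"),
   ("cert verify", "CERT Verify"),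
   ("change cipher spec", "Change Cipher Spec"),
   ("finished", "Finished"),
   ("new session ticket", "New Session Ticket")]

def pvInitA : PySem.Dict String (PySem.Dict String String) :=
  PySem.Dict.ofList
    [("Client Hello", PySem.Dict.ofList [("direction", "OUT"), ("status", "pending")]),
     ("Server Hello", PySem.Dict.ofList [("direction", "IN"), ("status", "pending")]),
     ("Encrypted Extensions", PySem.Dict.ofList [("direction", "IN"), ("status", "pending")]),
     ("Certificate", PySem.Dict.ofList [("direction", "IN"), ("status", "pending")]),
     ("CERT Verify", PySem.Dict.ofList [("direction", "IN"), ("status", "pending")]),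
     ("Change Cipher Spec", PySem.Dict.ofList [("direction", "OUT"), ("status", "pending")]),
     ("Finished", PySem.Dict.ofList [("direction", "OUT"), ("status", "pending")]),
     ("New Session Ticket", PySem.Dict.ofList [("direction", "IN"), ("status", "skipped")])]

def parse_curl_handshake (output : String) : List (String × List (String × String)) :=
  -- output.split("\n"): sep ≠ "" so Str.split? is always some; .getD [] is exact
  let lines := (PySem.Str.split? output "\n").getD []
  let st := lines.foldl
    (fun (st : PySem.Dict String (PySem.Dict String String) × Bool) line =>
      let lower_line := PySem.Str.lower line
      pvMappingA.foldl
        (fun st kv =>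
          if PySem.Str.isIn kv.1 lower_line then
            (st.1.modify kv.2 PySem.Dict.empty (fun d => d.insert "status" "success"),
             st.2 || (kv.1 == "new session ticket"))
          else st)
        st)
    (pvInitA, false)
  let stages :=
    if !st.2 then
      st.1.modify "New Session Ticket" PySem.Dict.empty (fun d => d.insert "status" "skipped")
    else st.1
  stages.items.map (fun p => (p.1, p.2.items))

-- ===== PORT B =====
def pvStagesB : PySem.Dict String (PySem.Dict String String) :=
  PySem.Dict.ofList
    [("Client Hello", PySem.Dict.ofList [("direction", "OUT"), ("status", "pending")]),
     ("Server Hello", PySem.Dict.ofList [("direction", "IN"), ("status", "pending")]),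
     ("Encrypted Extensions", PySem.Dict.ofList [("direction", "IN"), ("status", "pending")]),
     ("Certificate", PySem.Dict.ofList [("direction", "IN"), ("status", "pending")]),
     ("CERT Verify", PySem.Dict.ofList [("direction", "IN"), ("status", "pending")]),
     ("Change Cipher Spec", PySem.Dict.ofList [("direction", "OUT"), ("status", "pending")]),
     ("Finished", PySem.Dict.ofList [("direction", "OUT"), ("status", "pending")]),
     ("New Session Ticket", PySem.Dict.ofList [("direction", "IN"), ("status", "skipped")])]

def pvPairsB : List (String × String) :=
  [("client hello", "Client Hello"),
   ("server hello", "Server Hello"),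
   ("encrypted extensions", "Encrypted Extensions"),
   ("certificate", "Certificate"),
   ("cert verify", "CERT Verify"),
   ("change cipher spec", "Change Cipher Spec"),
   ("finished", "Finished"),
   ("new session ticket", "New Session Ticket")]

def parse_curl_handshake_alt (output : String) : List (String × List (String × String)) :=
  let text := PySem.Str.lower output
  let stages := pvPairsB.foldl
    (fun st kv =>
      if PySem.Str.isIn kv.1 text then
        st.modify kv.2 PySem.Dict.empty (fun d => d.insert "status" "success")
      else st)
    pvStagesB
  stages.items.map (fun p => (p.1, p.2.items))

-- ===== PRECONDITION & SPEC =====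
def Spec_parse_curl_handshake (output : String) (out : List (String × List (String × String))) : Prop := out = parse_curl_handshake_alt output
instance (output : String) (out : List (String × List (String × String))) : Decidable (Spec_parse_curl_handshake output out) := by unfold Spec_parse_curl_handshake; infer_instance

-- ===== CLAIM (what is proved, stated in full; the proofs are below) =====
def Claim_equal_parse_curl_handshake : Prop := ∀ (output : String), Dom_parse_curl_handshake output → Spec_parse_curl_handshake output (parse_curl_handshake output)

-- ===== LEMMAS AND PROOFS =====

-- canonical state: the stages dict as a function of the 8 "key was seen" booleans
def pvSt (b : Bool) : String := if b then "success" else "pending"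

def pvState (b1 b2 b3 b4 b5 b6 b7 b8 : Bool) : PySem.Dict String (PySem.Dict String String) :=
  PySem.Dict.ofList
    [("Client Hello", PySem.Dict.ofList [("direction", "OUT"), ("status", pvSt b1)]),
     ("Server Hello", PySem.Dict.ofList [("direction", "IN"), ("status", pvSt b2)]),
     ("Encrypted Extensions", PySem.Dict.ofList [("direction", "IN"), ("status", pvSt b3)]),
     ("Certificate", PySem.Dict.ofList [("direction", "IN"), ("status", pvSt b4)]),
     ("CERT Verify", PySem.Dict.ofList [("direction", "IN"), ("status", pvSt b5)]),
     ("Change Cipher Spec", PySem.Dict.ofList [("direction", "OUT"), ("status", pvSt b6)]),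
     ("Finished", PySem.Dict.ofList [("direction", "OUT"), ("status", pvSt b7)]),
     ("New Session Ticket", PySem.Dict.ofList [("direction", "IN"), ("status", if b8 then "success" else "skipped")])]

def pvOut (b1 b2 b3 b4 b5 b6 b7 b8 : Bool) : List (String × List (String × String)) :=
  (pvState b1 b2 b3 b4 b5 b6 b7 b8).items.map (fun p => (p.1, p.2.items))

theorem pvUpd1 : ∀ b1 b2 b3 b4 b5 b6 b7 b8 : Bool,
    (pvState b1 b2 b3 b4 b5 b6 b7 b8).modify "Client Hello" PySem.Dict.empty
      (fun d => d.insert "status" "success") = pvState true b2 b3 b4 b5 b6 b7 b8 := by decide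

theorem pvUpd2 : ∀ b1 b2 b3 b4 b5 b6 b7 b8 : Bool,
    (pvState b1 b2 b3 b4 b5 b6 b7 b8).modify "Server Hello" PySem.Dict.empty
      (fun d => d.insert "status" "success") = pvState b1 true b3 b4 b5 b6 b7 b8 := by decide

theorem pvUpd3 : ∀ b1 b2 b3 b4 b5 b6 b7 b8 : Bool,
    (pvState b1 b2 b3 b4 b5 b6 b7 b8).modify "Encrypted Extensions" PySem.Dict.empty
      (fun d => d.insert "status" "success") = pvState b1 b2 true b4 b5 b6 b7 b8 := by decide

theorem pvUpd4 : ∀ b1 b2 b3 b4 b5 b6 b7 b8 : Bool,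
    (pvState b1 b2 b3 b4 b5 b6 b7 b8).modify "Certificate" PySem.Dict.empty
      (fun d => d.insert "status" "success") = pvState b1 b2 b3 true b5 b6 b7 b8 := by decide

theorem pvUpd5 : ∀ b1 b2 b3 b4 b5 b6 b7 b8 : Bool,
    (pvState b1 b2 b3 b4 b5 b6 b7 b8).modify "CERT Verify" PySem.Dict.empty
      (fun d => d.insert "status" "success") = pvState b1 b2 b3 b4 true b6 b7 b8 := by decide

theorem pvUpd6 : ∀ b1 b2 b3 b4 b5 b6 b7 b8 : Bool,
    (pvState b1 b2 b3 b4 b5 b6 b7 b8).modify "Change Cipher Spec" PySem.Dict.empty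
      (fun d => d.insert "status" "success") = pvState b1 b2 b3 b4 b5 true b7 b8 := by decide

theorem pvUpd7 : ∀ b1 b2 b3 b4 b5 b6 b7 b8 : Bool,
    (pvState b1 b2 b3 b4 b5 b6 b7 b8).modify "Finished" PySem.Dict.empty
      (fun d => d.insert "status" "success") = pvState b1 b2 b3 b4 b5 b6 true b8 := by decide

theorem pvUpd8 : ∀ b1 b2 b3 b4 b5 b6 b7 b8 : Bool,
    (pvState b1 b2 b3 b4 b5 b6 b7 b8).modify "New Session Ticket" PySem.Dict.empty
      (fun d => d.insert "status" "success") = pvState b1 b2 b3 b4 b5 b6 b7 true := by decide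

theorem pvSkipFix : ∀ b1 b2 b3 b4 b5 b6 b7 : Bool,
    (pvState b1 b2 b3 b4 b5 b6 b7 false).modify "New Session Ticket" PySem.Dict.empty
      (fun d => d.insert "status" "skipped") = pvState b1 b2 b3 b4 b5 b6 b7 false := by decide

theorem pvInitA_eq : pvInitA = pvState false false false false false false false false := by decide

theorem pvStagesB_eq : pvStagesB = pvState false false false false false false false false := by decide

-- the core splitting fact: an infix without the separator lives wholly left or wholly right of it
theorem pvInfixSplit {α : Type} (sub a b : List α) (x : α) (hx : x ∉ sub) :
    sub <:+: (a ++ x :: b) ↔ sub <:+: a ∨ sub <:+: b := by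
  constructor
  · intro h
    induction a with
    | nil =>
      rcases List.infix_cons_iff.mp h with hp | hi
      · cases sub with
        | nil => exact Or.inl List.nil_infix
        | cons s ss =>
          exfalso
          rcases hp with ⟨t, ht⟩
          cases ht
          exact hx (List.mem_cons_self ..)
      · exact Or.inr hi
    | cons c a ih =>
      rcases List.infix_cons_iff.mp h with hp | hi
      · simp only [List.append_eq] at hp
        by_cases hlen : sub.length ≤ (c :: a).length
        · left
          have hsub : sub = (c :: (a ++ x :: b)).take sub.length :=
            List.prefix_iff_eq_take.mp hp
          have hpfx : sub <+: c :: a := by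
            have hce : c :: (a ++ x :: b) = (c :: a) ++ (x :: b) := by simp
            rw [List.prefix_iff_eq_take]
            calc sub = List.take sub.length (c :: (a ++ x :: b)) := hsub
              _ = List.take sub.length (c :: a) := by
                  rw [hce, List.take_append_of_le_length hlen]
          exact hpfx.isInfix
        · exfalso
          have hlt : a.length + 1 < sub.length := by simp at hlen; omega
          have hmem : sub[a.length + 1]'hlt ∈ sub := List.getElem_mem hlt
          have heq : sub[a.length + 1]'hlt = x := by
            rw [List.IsPrefix.getElem hp hlt, List.getElem_cons_succ]
            rw [List.getElem_append_right (Nat.le_refl _)]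
            simp
          exact hx (heq ▸ hmem)
      · rcases ih hi with h' | h'
        · exact Or.inl (List.infix_cons h')
        · exact Or.inr h'
  · rintro (⟨s, t, h⟩ | ⟨s, t, h⟩)
    · exact ⟨s, t ++ x :: b, by rw [← h]; simp⟩
    · exact ⟨a ++ x :: s, t, by rw [← h]; simp⟩

theorem pvLowerNewline : PySem.Chars.lowerChar '\n' = '\n' := by decide

theorem pvIsInSplit (key A B : List Char) (hk : '\n' ∉ key) :
    PySem.Chars.isIn key (PySem.Chars.lower (A ++ '\n' :: B)) =
      (PySem.Chars.isIn key (PySem.Chars.lower A) || PySem.Chars.isIn key (PySem.Chars.lower B)) := by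
  have hlo : PySem.Chars.lower (A ++ '\n' :: B) =
      PySem.Chars.lower A ++ '\n' :: PySem.Chars.lower B := by
    simp [PySem.Chars.lower, pvLowerNewline]
  rw [hlo]
  rw [Bool.eq_iff_iff, Bool.or_eq_true, PySem.Chars.isIn_iff_infix,
    PySem.Chars.isIn_iff_infix, PySem.Chars.isIn_iff_infix]
  exact pvInfixSplit key _ _ '\n' hk

theorem pvGoAny (key : List Char) (hk : '\n' ∉ key) :
    ∀ (fuel : Nat) (l cur : List Char) (acc : List (List Char)), l.length < fuel →
    (PySem.Chars.splitOn.go ['\n'] fuel l cur acc).any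
        (fun line => PySem.Chars.isIn key (PySem.Chars.lower line))
      = (acc.any (fun line => PySem.Chars.isIn key (PySem.Chars.lower line))
          || PySem.Chars.isIn key (PySem.Chars.lower (cur.reverse ++ l))) := by
  intro fuel
  induction fuel with
  | zero => intro l cur acc h; omega
  | succ fuel ih =>
    intro l cur acc h
    cases l with
    | nil =>
      rw [PySem.Chars.splitOn.go]
      · simp [Bool.or_comm]
      · omega
    | cons c rest =>
      rw [PySem.Chars.splitOn.go]
      by_cases hc : c = '\n'
      · subst hc
        have hpre : ['\n'].isPrefixOf ('\n' :: rest) = true := by simp [List.isPrefixOf]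
        rw [if_pos hpre]
        have : List.drop (['\n'].length) ('\n' :: rest) = rest := by simp
        rw [this, ih rest [] (cur.reverse :: acc) (by simp at h ⊢; omega)]
        rw [pvIsInSplit key cur.reverse rest hk]
        simp [Bool.or_comm, Bool.or_assoc]
      · have hpre : ['\n'].isPrefixOf (c :: rest) = false := by
          simp [List.isPrefixOf]
          exact fun h' => hc h'.symm
        rw [if_neg (by simp [hpre])]
        rw [ih rest (c :: cur) acc (by simp at h ⊢; omega)]
        simp

theorem pvAnyLine (k : String) (hk : '\n' ∉ k.toList) (output : String) :
    ((PySem.Str.split? output "\n").getD []).any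
        (fun line => PySem.Str.isIn k (PySem.Str.lower line))
      = PySem.Str.isIn k (PySem.Str.lower output) := by
  have hnl : ("\n" : String).toList = ['\n'] := by decide
  have hm := PySem.Str.split?_map output "\n"
  rw [hnl] at hm
  have hsp : PySem.Chars.split? output.toList ['\n'] =
      some (PySem.Chars.splitOn output.toList ['\n']) := by
    simp [PySem.Chars.split?]
  rw [hsp] at hm
  cases hq : PySem.Str.split? output "\n" with
  | none => rw [hq] at hm; simp at hm
  | some ls =>
    rw [hq] at hm
    simp only [Option.map_some, Option.some.injEq] at hm
    have h1 : ls.any (fun line => PySem.Str.isIn k (PySem.Str.lower line))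
        = (ls.map String.toList).any
            (fun l => PySem.Chars.isIn k.toList (PySem.Chars.lower l)) := by
      rw [List.any_map]
      simp [Function.comp_def]
    rw [Option.getD_some, h1, hm]
    rw [PySem.Chars.splitOn]
    rw [pvGoAny k.toList hk (output.toList.length + 1) output.toList [] [] (by omega)]
    simp

-- per-key step lemmas for A's inner loop (state = (stages, found_new_session_ticket))
theorem pvStepA1 (line : String) (b1 b2 b3 b4 b5 b6 b7 b8 f : Bool) :
    (if PySem.Str.isIn "client hello" (PySem.Str.lower line) then
       ((pvState b1 b2 b3 b4 b5 b6 b7 b8).modify "Client Hello" PySem.Dict.empty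
          (fun d => d.insert "status" "success"), f || (("client hello" : String) == "new session ticket"))
     else (pvState b1 b2 b3 b4 b5 b6 b7 b8, f))
    = (pvState (b1 || PySem.Str.isIn "client hello" (PySem.Str.lower line)) b2 b3 b4 b5 b6 b7 b8, f) := by
  have hne : (("client hello" : String) == "new session ticket") = false := by decide
  cases h : PySem.Str.isIn "client hello" (PySem.Str.lower line) <;> simp [hne, pvUpd1]

theorem pvStepA2 (line : String) (b1 b2 b3 b4 b5 b6 b7 b8 f : Bool) :
    (if PySem.Str.isIn "server hello" (PySem.Str.lower line) then
       ((pvState b1 b2 b3 b4 b5 b6 b7 b8).modify "Server Hello" PySem.Dict.empty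
          (fun d => d.insert "status" "success"), f || (("server hello" : String) == "new session ticket"))
     else (pvState b1 b2 b3 b4 b5 b6 b7 b8, f))
    = (pvState b1 (b2 || PySem.Str.isIn "server hello" (PySem.Str.lower line)) b3 b4 b5 b6 b7 b8, f) := by
  have hne : (("server hello" : String) == "new session ticket") = false := by decide
  cases h : PySem.Str.isIn "server hello" (PySem.Str.lower line) <;> simp [hne, pvUpd2]

theorem pvStepA3 (line : String) (b1 b2 b3 b4 b5 b6 b7 b8 f : Bool) :
    (if PySem.Str.isIn "encrypted extensions" (PySem.Str.lower line) then
       ((pvState b1 b2 b3 b4 b5 b6 b7 b8).modify "Encrypted Extensions" PySem.Dict.empty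
          (fun d => d.insert "status" "success"), f || (("encrypted extensions" : String) == "new session ticket"))
     else (pvState b1 b2 b3 b4 b5 b6 b7 b8, f))
    = (pvState b1 b2 (b3 || PySem.Str.isIn "encrypted extensions" (PySem.Str.lower line)) b4 b5 b6 b7 b8, f) := by
  have hne : (("encrypted extensions" : String) == "new session ticket") = false := by decide
  cases h : PySem.Str.isIn "encrypted extensions" (PySem.Str.lower line) <;> simp [hne, pvUpd3]

theorem pvStepA4 (line : String) (b1 b2 b3 b4 b5 b6 b7 b8 f : Bool) :
    (if PySem.Str.isIn "certificate" (PySem.Str.lower line) then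
       ((pvState b1 b2 b3 b4 b5 b6 b7 b8).modify "Certificate" PySem.Dict.empty
          (fun d => d.insert "status" "success"), f || (("certificate" : String) == "new session ticket"))
     else (pvState b1 b2 b3 b4 b5 b6 b7 b8, f))
    = (pvState b1 b2 b3 (b4 || PySem.Str.isIn "certificate" (PySem.Str.lower line)) b5 b6 b7 b8, f) := by
  have hne : (("certificate" : String) == "new session ticket") = false := by decide
  cases h : PySem.Str.isIn "certificate" (PySem.Str.lower line) <;> simp [hne, pvUpd4]

theorem pvStepA5 (line : String) (b1 b2 b3 b4 b5 b6 b7 b8 f : Bool) :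
    (if PySem.Str.isIn "cert verify" (PySem.Str.lower line) then
       ((pvState b1 b2 b3 b4 b5 b6 b7 b8).modify "CERT Verify" PySem.Dict.empty
          (fun d => d.insert "status" "success"), f || (("cert verify" : String) == "new session ticket"))
     else (pvState b1 b2 b3 b4 b5 b6 b7 b8, f))
    = (pvState b1 b2 b3 b4 (b5 || PySem.Str.isIn "cert verify" (PySem.Str.lower line)) b6 b7 b8, f) := by
  have hne : (("cert verify" : String) == "new session ticket") = false := by decide
  cases h : PySem.Str.isIn "cert verify" (PySem.Str.lower line) <;> simp [hne, pvUpd5]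

theorem pvStepA6 (line : String) (b1 b2 b3 b4 b5 b6 b7 b8 f : Bool) :
    (if PySem.Str.isIn "change cipher spec" (PySem.Str.lower line) then
       ((pvState b1 b2 b3 b4 b5 b6 b7 b8).modify "Change Cipher Spec" PySem.Dict.empty
          (fun d => d.insert "status" "success"), f || (("change cipher spec" : String) == "new session ticket"))
     else (pvState b1 b2 b3 b4 b5 b6 b7 b8, f))
    = (pvState b1 b2 b3 b4 b5 (b6 || PySem.Str.isIn "change cipher spec" (PySem.Str.lower line)) b7 b8, f) := by
  have hne : (("change cipher spec" : String) == "new session ticket") = false := by decide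
  cases h : PySem.Str.isIn "change cipher spec" (PySem.Str.lower line) <;> simp [hne, pvUpd6]

theorem pvStepA7 (line : String) (b1 b2 b3 b4 b5 b6 b7 b8 f : Bool) :
    (if PySem.Str.isIn "finished" (PySem.Str.lower line) then
       ((pvState b1 b2 b3 b4 b5 b6 b7 b8).modify "Finished" PySem.Dict.empty
          (fun d => d.insert "status" "success"), f || (("finished" : String) == "new session ticket"))
     else (pvState b1 b2 b3 b4 b5 b6 b7 b8, f))
    = (pvState b1 b2 b3 b4 b5 b6 (b7 || PySem.Str.isIn "finished" (PySem.Str.lower line)) b8, f) := by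
  have hne : (("finished" : String) == "new session ticket") = false := by decide
  cases h : PySem.Str.isIn "finished" (PySem.Str.lower line) <;> simp [hne, pvUpd7]

theorem pvStepA8 (line : String) (b1 b2 b3 b4 b5 b6 b7 b8 f : Bool) :
    (if PySem.Str.isIn "new session ticket" (PySem.Str.lower line) then
       ((pvState b1 b2 b3 b4 b5 b6 b7 b8).modify "New Session Ticket" PySem.Dict.empty
          (fun d => d.insert "status" "success"), f || (("new session ticket" : String) == "new session ticket"))
     else (pvState b1 b2 b3 b4 b5 b6 b7 b8, f))
    = (pvState b1 b2 b3 b4 b5 b6 b7 (b8 || PySem.Str.isIn "new session ticket" (PySem.Str.lower line)),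
       f || PySem.Str.isIn "new session ticket" (PySem.Str.lower line)) := by
  have heq : (("new session ticket" : String) == "new session ticket") = true := by decide
  cases h : PySem.Str.isIn "new session ticket" (PySem.Str.lower line) <;> simp [pvUpd8]

-- one whole line of A's outer loop
theorem pvLineA (line : String) (b1 b2 b3 b4 b5 b6 b7 b8 f : Bool) :
    pvMappingA.foldl
      (fun st kv =>
        if PySem.Str.isIn kv.1 (PySem.Str.lower line) then
          (st.1.modify kv.2 PySem.Dict.empty (fun d => d.insert "status" "success"),
           st.2 || (kv.1 == "new session ticket"))
        else st)
      (pvState b1 b2 b3 b4 b5 b6 b7 b8, f)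
    = (pvState (b1 || PySem.Str.isIn "client hello" (PySem.Str.lower line))
               (b2 || PySem.Str.isIn "server hello" (PySem.Str.lower line))
               (b3 || PySem.Str.isIn "encrypted extensions" (PySem.Str.lower line))
               (b4 || PySem.Str.isIn "certificate" (PySem.Str.lower line))
               (b5 || PySem.Str.isIn "cert verify" (PySem.Str.lower line))
               (b6 || PySem.Str.isIn "change cipher spec" (PySem.Str.lower line))
               (b7 || PySem.Str.isIn "finished" (PySem.Str.lower line))
               (b8 || PySem.Str.isIn "new session ticket" (PySem.Str.lower line)),
       f || PySem.Str.isIn "new session ticket" (PySem.Str.lower line)) := by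
  simp only [pvMappingA, List.foldl_cons, List.foldl_nil]
  rw [pvStepA1, pvStepA2, pvStepA3, pvStepA4, pvStepA5, pvStepA6, pvStepA7, pvStepA8]

-- A's whole outer loop (flag invariant: flag = 8th boolean)
theorem pvFoldA (lines : List String) :
    ∀ b1 b2 b3 b4 b5 b6 b7 b8 : Bool,
    lines.foldl
      (fun (st : PySem.Dict String (PySem.Dict String String) × Bool) line =>
        pvMappingA.foldl
          (fun st kv =>
            if PySem.Str.isIn kv.1 (PySem.Str.lower line) then
              (st.1.modify kv.2 PySem.Dict.empty (fun d => d.insert "status" "success"),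
               st.2 || (kv.1 == "new session ticket"))
            else st)
          st)
      (pvState b1 b2 b3 b4 b5 b6 b7 b8, b8)
    = (pvState (b1 || lines.any (fun line => PySem.Str.isIn "client hello" (PySem.Str.lower line)))
               (b2 || lines.any (fun line => PySem.Str.isIn "server hello" (PySem.Str.lower line)))
               (b3 || lines.any (fun line => PySem.Str.isIn "encrypted extensions" (PySem.Str.lower line)))
               (b4 || lines.any (fun line => PySem.Str.isIn "certificate" (PySem.Str.lower line)))
               (b5 || lines.any (fun line => PySem.Str.isIn "cert verify" (PySem.Str.lower line)))
               (b6 || lines.any (fun line => PySem.Str.isIn "change cipher spec" (PySem.Str.lower line)))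
               (b7 || lines.any (fun line => PySem.Str.isIn "finished" (PySem.Str.lower line)))
               (b8 || lines.any (fun line => PySem.Str.isIn "new session ticket" (PySem.Str.lower line))),
       b8 || lines.any (fun line => PySem.Str.isIn "new session ticket" (PySem.Str.lower line))) := by
  induction lines with
  | nil => intro b1 b2 b3 b4 b5 b6 b7 b8; simp
  | cons l ls ih =>
    intro b1 b2 b3 b4 b5 b6 b7 b8
    simp only [List.foldl_cons]
    rw [pvLineA, ih]
    simp [List.any_cons, Bool.or_assoc]

-- per-key step lemmas for B's single pass
theorem pvStepB1 (text : String) (b1 b2 b3 b4 b5 b6 b7 b8 : Bool) :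
    (if PySem.Str.isIn "client hello" text then
       (pvState b1 b2 b3 b4 b5 b6 b7 b8).modify "Client Hello" PySem.Dict.empty
         (fun d => d.insert "status" "success")
     else pvState b1 b2 b3 b4 b5 b6 b7 b8)
    = pvState (b1 || PySem.Str.isIn "client hello" text) b2 b3 b4 b5 b6 b7 b8 := by
  cases h : PySem.Str.isIn "client hello" text <;> simp [pvUpd1]

theorem pvStepB2 (text : String) (b1 b2 b3 b4 b5 b6 b7 b8 : Bool) :
    (if PySem.Str.isIn "server hello" text then
       (pvState b1 b2 b3 b4 b5 b6 b7 b8).modify "Server Hello" PySem.Dict.empty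
         (fun d => d.insert "status" "success")
     else pvState b1 b2 b3 b4 b5 b6 b7 b8)
    = pvState b1 (b2 || PySem.Str.isIn "server hello" text) b3 b4 b5 b6 b7 b8 := by
  cases h : PySem.Str.isIn "server hello" text <;> simp [pvUpd2]

theorem pvStepB3 (text : String) (b1 b2 b3 b4 b5 b6 b7 b8 : Bool) :
    (if PySem.Str.isIn "encrypted extensions" text then
       (pvState b1 b2 b3 b4 b5 b6 b7 b8).modify "Encrypted Extensions" PySem.Dict.empty
         (fun d => d.insert "status" "success")
     else pvState b1 b2 b3 b4 b5 b6 b7 b8)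
    = pvState b1 b2 (b3 || PySem.Str.isIn "encrypted extensions" text) b4 b5 b6 b7 b8 := by
  cases h : PySem.Str.isIn "encrypted extensions" text <;> simp [pvUpd3]

theorem pvStepB4 (text : String) (b1 b2 b3 b4 b5 b6 b7 b8 : Bool) :
    (if PySem.Str.isIn "certificate" text then
       (pvState b1 b2 b3 b4 b5 b6 b7 b8).modify "Certificate" PySem.Dict.empty
         (fun d => d.insert "status" "success")
     else pvState b1 b2 b3 b4 b5 b6 b7 b8)
    = pvState b1 b2 b3 (b4 || PySem.Str.isIn "certificate" text) b5 b6 b7 b8 := by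
  cases h : PySem.Str.isIn "certificate" text <;> simp [pvUpd4]

theorem pvStepB5 (text : String) (b1 b2 b3 b4 b5 b6 b7 b8 : Bool) :
    (if PySem.Str.isIn "cert verify" text then
       (pvState b1 b2 b3 b4 b5 b6 b7 b8).modify "CERT Verify" PySem.Dict.empty
         (fun d => d.insert "status" "success")
     else pvState b1 b2 b3 b4 b5 b6 b7 b8)
    = pvState b1 b2 b3 b4 (b5 || PySem.Str.isIn "cert verify" text) b6 b7 b8 := by
  cases h : PySem.Str.isIn "cert verify" text <;> simp [pvUpd5]

theorem pvStepB6 (text : String) (b1 b2 b3 b4 b5 b6 b7 b8 : Bool) :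
    (if PySem.Str.isIn "change cipher spec" text then
       (pvState b1 b2 b3 b4 b5 b6 b7 b8).modify "Change Cipher Spec" PySem.Dict.empty
         (fun d => d.insert "status" "success")
     else pvState b1 b2 b3 b4 b5 b6 b7 b8)
    = pvState b1 b2 b3 b4 b5 (b6 || PySem.Str.isIn "change cipher spec" text) b7 b8 := by
  cases h : PySem.Str.isIn "change cipher spec" text <;> simp [pvUpd6]

theorem pvStepB7 (text : String) (b1 b2 b3 b4 b5 b6 b7 b8 : Bool) :
    (if PySem.Str.isIn "finished" text then
       (pvState b1 b2 b3 b4 b5 b6 b7 b8).modify "Finished" PySem.Dict.empty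
         (fun d => d.insert "status" "success")
     else pvState b1 b2 b3 b4 b5 b6 b7 b8)
    = pvState b1 b2 b3 b4 b5 b6 (b7 || PySem.Str.isIn "finished" text) b8 := by
  cases h : PySem.Str.isIn "finished" text <;> simp [pvUpd7]

theorem pvStepB8 (text : String) (b1 b2 b3 b4 b5 b6 b7 b8 : Bool) :
    (if PySem.Str.isIn "new session ticket" text then
       (pvState b1 b2 b3 b4 b5 b6 b7 b8).modify "New Session Ticket" PySem.Dict.empty
         (fun d => d.insert "status" "success")
     else pvState b1 b2 b3 b4 b5 b6 b7 b8)
    = pvState b1 b2 b3 b4 b5 b6 b7 (b8 || PySem.Str.isIn "new session ticket" text) := by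
  cases h : PySem.Str.isIn "new session ticket" text <;> simp [pvUpd8]

theorem pvB_char (output : String) :
    parse_curl_handshake_alt output
      = pvOut (PySem.Str.isIn "client hello" (PySem.Str.lower output))
              (PySem.Str.isIn "server hello" (PySem.Str.lower output))
              (PySem.Str.isIn "encrypted extensions" (PySem.Str.lower output))
              (PySem.Str.isIn "certificate" (PySem.Str.lower output))
              (PySem.Str.isIn "cert verify" (PySem.Str.lower output))
              (PySem.Str.isIn "change cipher spec" (PySem.Str.lower output))
              (PySem.Str.isIn "finished" (PySem.Str.lower output))
              (PySem.Str.isIn "new session ticket" (PySem.Str.lower output)) := by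
  simp only [parse_curl_handshake_alt]
  rw [pvStagesB_eq]
  simp only [pvPairsB, List.foldl_cons, List.foldl_nil]
  rw [pvStepB1, pvStepB2, pvStepB3, pvStepB4, pvStepB5, pvStepB6, pvStepB7, pvStepB8]
  simp [pvOut]

theorem pvA_char (output : String) :
    parse_curl_handshake output
      = pvOut (((PySem.Str.split? output "\n").getD []).any (fun line => PySem.Str.isIn "client hello" (PySem.Str.lower line)))
              (((PySem.Str.split? output "\n").getD []).any (fun line => PySem.Str.isIn "server hello" (PySem.Str.lower line)))
              (((PySem.Str.split? output "\n").getD []).any (fun line => PySem.Str.isIn "encrypted extensions" (PySem.Str.lower line)))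
              (((PySem.Str.split? output "\n").getD []).any (fun line => PySem.Str.isIn "certificate" (PySem.Str.lower line)))
              (((PySem.Str.split? output "\n").getD []).any (fun line => PySem.Str.isIn "cert verify" (PySem.Str.lower line)))
              (((PySem.Str.split? output "\n").getD []).any (fun line => PySem.Str.isIn "change cipher spec" (PySem.Str.lower line)))
              (((PySem.Str.split? output "\n").getD []).any (fun line => PySem.Str.isIn "finished" (PySem.Str.lower line)))
              (((PySem.Str.split? output "\n").getD []).any (fun line => PySem.Str.isIn "new session ticket" (PySem.Str.lower line))) := by
  simp only [parse_curl_handshake]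
  rw [pvInitA_eq, pvFoldA]
  simp only [Bool.false_or]
  cases h8 : ((PySem.Str.split? output "\n").getD []).any
      (fun line => PySem.Str.isIn "new session ticket" (PySem.Str.lower line)) with
  | false => simp [pvSkipFix, pvOut]
  | true => simp [pvOut]

-- ===== VERDICT (by name: the statement is the Claim_ definition above) =====
theorem parse_curl_handshake_spec : Claim_equal_parse_curl_handshake := by
  intro output _
  show parse_curl_handshake output = parse_curl_handshake_alt output
  rw [pvA_char, pvB_char]
  rw [pvAnyLine "client hello" (by decide) output,
      pvAnyLine "server hello" (by decide) output,
      pvAnyLine "encrypted extensions" (by decide) output,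
      pvAnyLine "certificate" (by decide) output,
      pvAnyLine "cert verify" (by decide) output,
      pvAnyLine "change cipher spec" (by decide) output,
      pvAnyLine "finished" (by decide) output,
      pvAnyLine "new session ticket" (by decide) output]
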